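-- pv_equiv track=rewrite | github.com/fs-ise/handbook | import.py | extract_transition_fields
-- ===== SOURCE A (Python) =====
-- def extract_transition_fields(front_matter: str):
--     """Extract transition_status and transition_comment from YAML-like text."""
--     transition_status = None
--     transition_comment = None
--
--     if not front_matter:
--         return transition_status, transition_comment
--
--     # Very simple line-based extraction to avoid yaml dependency
--     for line in front_matter.splitlines():
--         stripped = line.strip()
--         if stripped.startswith("transition_status:"):
--             value = stripped.split(":", 1)[1].strip()
--             transition_status = value.strip('\'"')
--         elif stripped.startswith("transition_comment:"):
--             value = stripped.split(":", 1)[1].strip()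
--             transition_comment = value.strip('\'"')
--
--     return transition_status, transition_comment
-- ===== SOURCE B (Python) =====
-- def extract_transition_fields(front_matter: str):
--     """Extract transition_status and transition_comment from YAML-like text."""
--     if not front_matter:
--         return None, None
--
--     fields = {}
--     for line in front_matter.splitlines():
--         stripped = line.strip()
--         if ':' in stripped:
--             key, rest = stripped.split(':', 1)
--             fields[key] = rest.strip().strip('\'"')
--
--     return fields.get('transition_status'), fields.get('transition_comment')
-- ===== Notes on version B (the rewrite author's own statement) =====
-- stated objective: simpler
-- what changed: Replaces the per-key startswith branch chain with one generic pass that splits each colon-bearing line into a key/value pair stored in a dict (last value wins by overwrite) and two lookups at the end.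
import Mathlib
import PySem

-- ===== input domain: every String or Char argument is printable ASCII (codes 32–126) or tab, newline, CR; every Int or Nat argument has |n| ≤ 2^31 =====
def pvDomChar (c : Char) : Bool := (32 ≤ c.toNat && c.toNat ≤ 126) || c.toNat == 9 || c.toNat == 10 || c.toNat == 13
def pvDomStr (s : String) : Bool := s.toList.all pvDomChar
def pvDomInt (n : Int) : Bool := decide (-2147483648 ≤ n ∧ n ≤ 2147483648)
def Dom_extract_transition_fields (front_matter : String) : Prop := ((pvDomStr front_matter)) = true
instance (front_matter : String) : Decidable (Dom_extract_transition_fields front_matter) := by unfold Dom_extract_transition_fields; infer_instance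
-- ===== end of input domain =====

-- ===== PORT A =====
-- B replaces A's per-key startswith branches with one generic key:value dict pass; return values proved equal (objective: simpler).
-- loop body of A: the two startswith branches updating the (status, comment) pair
def pvStepA (st : Option String × Option String) (line : String) : Option String × Option String :=
  let stripped := PySem.Str.strip line
  if PySem.Str.startswith stripped "transition_status:" then
    match (PySem.Str.splitMax? stripped ":" 1).bind (fun parts => PySem.List.pyGet? parts 1) with
    | some v => (some (PySem.Str.stripChars (PySem.Str.strip v) "'\""), st.2)
    | none => st
  else if PySem.Str.startswith stripped "transition_comment:" then
    match (PySem.Str.splitMax? stripped ":" 1).bind (fun parts => PySem.List.pyGet? parts 1) with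
    | some v => (st.1, some (PySem.Str.stripChars (PySem.Str.strip v) "'\""))
    | none => st
  else st

def extract_transition_fields (front_matter : String) : Option String × Option String :=
  if front_matter == "" then (none, none)
  else (PySem.Str.splitlines front_matter).foldl pvStepA (none, none)

-- ===== PORT B =====
-- loop body of B: store every colon-bearing line as a key/value dict entry (2-element unpacking of the one-split)
def pvStepB (d : PySem.Dict String String) (line : String) : PySem.Dict String String :=
  let stripped := PySem.Str.strip line
  if PySem.Str.isIn ":" stripped then
    match PySem.Str.splitMax? stripped ":" 1 with
    | some [key, rest] => d.insert key (PySem.Str.stripChars (PySem.Str.strip rest) "'\"")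
    | _ => d
  else d

def extract_transition_fields_alt (front_matter : String) : Option String × Option String :=
  if front_matter == "" then (none, none)
  else
    let d := (PySem.Str.splitlines front_matter).foldl pvStepB PySem.Dict.empty
    (d.get? "transition_status", d.get? "transition_comment")

-- ===== PRECONDITION & SPEC =====
def Spec_extract_transition_fields (front_matter : String) (out : Option String × Option String) : Prop := out = extract_transition_fields_alt front_matter
instance (front_matter : String) (out : Option String × Option String) : Decidable (Spec_extract_transition_fields front_matter out) := by unfold Spec_extract_transition_fields; infer_instance

-- ===== CLAIM (what is proved, stated in full; the proofs are below) =====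
def Claim_equal_extract_transition_fields : Prop := ∀ (front_matter : String), Dom_extract_transition_fields front_matter → Spec_extract_transition_fields front_matter (extract_transition_fields front_matter)

-- ===== LEMMAS AND PROOFS =====

-- splitOnMax.go at maxsplit 0 returns the whole remainder as the last piece
theorem pv_go_zero (fuel : Nat) (l cur : List Char) (acc : List (List Char)) :
    PySem.Chars.splitOnMax.go [':'] fuel 0 l cur acc = acc.reverse ++ [cur.reverse ++ l] := by
  cases fuel with
  | zero => simp [PySem.Chars.splitOnMax.go]
  | succ n => cases l <;> simp [PySem.Chars.splitOnMax.go]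

-- splitOnMax.go at maxsplit 1: split at the first ':' if any
theorem pv_go_one (l : List Char) (fuel : Nat) (cur : List Char) (acc : List (List Char))
    (h : l.length < fuel) :
    PySem.Chars.splitOnMax.go [':'] fuel 1 l cur acc =
      if ':' ∈ l then
        acc.reverse ++ [cur.reverse ++ l.takeWhile (fun c => c ≠ ':'),
          (l.dropWhile (fun c => c ≠ ':')).tail]
      else acc.reverse ++ [cur.reverse ++ l] := by
  induction l generalizing fuel cur acc with
  | nil =>
    cases fuel with
    | zero => omega
    | succ n => simp [PySem.Chars.splitOnMax.go]
  | cons c rest ih =>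
    cases fuel with
    | zero => omega
    | succ n =>
      by_cases hc : c = ':'
      · subst hc
        simp [PySem.Chars.splitOnMax.go, List.isPrefixOf, pv_go_zero, List.takeWhile,
          List.dropWhile]
      · have hp : ([':'].isPrefixOf (c :: rest)) = false := by
          simp [List.isPrefixOf]
          exact fun h' => absurd h'.symm hc
        have hlt : rest.length < n := by simp at h; omega
        simp only [PySem.Chars.splitOnMax.go]
        rw [hp]
        simp only [Bool.false_eq_true, if_false, if_neg (by omega : ¬ (1 : Nat) = 0)]
        rw [ih n (c :: cur) acc hlt]
        simp [hc, Ne.symm hc]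

-- s.split(':', 1) characterized: split at the first ':' if any, else [s]
theorem pv_split1 (t : List Char) :
    PySem.Chars.splitOnMax t [':'] 1 =
      if ':' ∈ t then
        [t.takeWhile (fun c => c ≠ ':'), (t.dropWhile (fun c => c ≠ ':')).tail]
      else [t] := by
  have h0 : ¬ ((1 : Int) < 0) := by omega
  simp only [PySem.Chars.splitOnMax, h0, if_false]
  have := pv_go_one t (t.length + 1) [] [] (by omega)
  simpa using this

-- takeWhile/dropWhile across a clean "key ++ ':' ++ rest" shape
theorem pv_tw_dw (a b : List Char) (ha : ∀ c ∈ a, c ≠ ':') :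
    (a ++ ':' :: b).takeWhile (fun c => c ≠ ':') = a ∧
    (a ++ ':' :: b).dropWhile (fun c => c ≠ ':') = ':' :: b := by
  induction a with
  | nil => simp
  | cons c rest ih =>
    have hc : c ≠ ':' := ha c (by simp)
    have ihh := ih (fun x hx => ha x (by simp [hx]))
    have h1 := ihh.1
    have h2 := ihh.2
    simp only [ne_eq, decide_not] at h1 h2 ⊢
    simp [hc, h1, h2]

-- when ':' occurs in t, dropWhile (≠ ':') starts with ':'
theorem pv_dropWhile_mem (t : List Char) (h : ':' ∈ t) :
    t.dropWhile (fun c => c ≠ ':') = ':' :: (t.dropWhile (fun c => c ≠ ':')).tail := by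
  induction t with
  | nil => simp at h
  | cons c rest ih =>
    by_cases hc : c = ':'
    · subst hc; simp
    · have hm : ':' ∈ rest := by
        rcases List.mem_cons.mp h with h' | h'
        · exact absurd h'.symm hc
        · exact h'
      have ihh := ih hm
      have hstep : List.dropWhile (fun c => decide (c ≠ ':')) (c :: rest) =
          List.dropWhile (fun c => decide (c ≠ ':')) rest := by
        simp [hc]
      rw [hstep]
      exact ihh

-- single-character membership test: ':' in s
theorem pv_isIn_colon (t : List Char) : PySem.Chars.isIn [':'] t = true ↔ ':' ∈ t := by
  rw [PySem.Chars.isIn_iff_infix]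
  constructor
  · rintro ⟨u, v, hv⟩
    subst hv; simp
  · intro hm
    rcases List.append_of_mem hm with ⟨u, v, hv⟩
    exact ⟨u, v, by simp [hv]⟩

-- the invariant that ties A's pair of accumulators to B's dict
def pvInv (st : Option String × Option String) (d : PySem.Dict String String) : Prop :=
  d.get? "transition_status" = st.1 ∧ d.get? "transition_comment" = st.2

-- startswith s (key ++ ":") pins down split(':', 1): key unchanged, rest after the colon
theorem pv_prefix_split (t : List Char) (key : List Char) (hk : ∀ c ∈ key, c ≠ ':')
    (h : (key ++ [':']).isPrefixOf t = true) :
    ':' ∈ t ∧ t.takeWhile (fun c => c ≠ ':') = key ∧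
      ':' :: (t.dropWhile (fun c => c ≠ ':')).tail = t.dropWhile (fun c => c ≠ ':') := by
  rcases List.isPrefixOf_iff_prefix.mp h with ⟨rest, hrest⟩
  have ht : t = key ++ ':' :: rest := by simpa using hrest.symm
  have hmem : ':' ∈ t := by simp [ht]
  refine ⟨hmem, ?_, (pv_dropWhile_mem t hmem).symm⟩
  rw [ht]; exact (pv_tw_dw key rest hk).1

-- non-key lines: if split(':', 1)[0] were "transition_status"/"transition_comment",
-- the startswith test would have fired
theorem pv_not_prefix (t : List Char) (key : List Char) (hmem : ':' ∈ t)
    (h : (key ++ [':']).isPrefixOf t = false)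
    (hk : t.takeWhile (fun c => c ≠ ':') = key) : False := by
  have hd := pv_dropWhile_mem t hmem
  have ht : t = key ++ ':' :: (t.dropWhile (fun c => c ≠ ':')).tail := by
    conv_lhs => rw [← List.takeWhile_append_dropWhile (p := fun c => c ≠ ':') (l := t)]
    rw [hk, hd]
    simp
  have : (key ++ [':']).isPrefixOf t = true := by
    rw [List.isPrefixOf_iff_prefix, ht]
    exact ⟨(t.dropWhile (fun c => c ≠ ':')).tail, by simp⟩
  rw [h] at this; exact absurd this (by simp)

-- one loop step preserves the invariant
theorem pv_step (st : Option String × Option String) (d : PySem.Dict String String)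
    (line : String) (h : pvInv st d) : pvInv (pvStepA st line) (pvStepB d line) := by
  have hkey1 : ∀ c ∈ "transition_status".toList, c ≠ ':' := by simp
  have hkey2 : ∀ c ∈ "transition_comment".toList, c ≠ ':' := by simp
  have hsplit1 : ("transition_status:".toList : List Char) =
      "transition_status".toList ++ [':'] := by rfl
  have hsplit2 : ("transition_comment:".toList : List Char) =
      "transition_comment".toList ++ [':'] := by rfl
  set t := (PySem.Str.strip line).toList with ht
  simp only [pvStepA, pvStepB]
  by_cases h1 : PySem.Str.startswith (PySem.Str.strip line) "transition_status:" = true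
  · -- status line
    have hpre : ("transition_status".toList ++ [':']).isPrefixOf t = true := by
      have := h1
      simp only [PySem.Str.startswith_eq, PySem.Chars.startswith] at this
      rwa [hsplit1] at this
    rcases pv_prefix_split t _ hkey1 hpre with ⟨hmem, htw, _⟩
    have hs : PySem.Str.splitMax? (PySem.Str.strip line) ":" 1 =
        some ["transition_status",
          String.ofList ((t.dropWhile (fun c => c ≠ ':')).tail)] := by
      simp only [PySem.Str.splitMax?, PySem.Chars.splitMax?]
      rw [show (":".toList : List Char) = [':'] from rfl]
      simp only [List.isEmpty_cons, ← ht, pv_split1 t, hmem, if_pos, htw]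
      simp
    have hin : PySem.Str.isIn ":" (PySem.Str.strip line) = true := by
      simp only [PySem.Str.isIn_eq]
      rw [show (":".toList : List Char) = [':'] from rfl, ← ht]
      exact (pv_isIn_colon t).mpr hmem
    rw [if_pos h1, if_pos hin, hs]
    refine ⟨?_, ?_⟩
    · simp [PySem.List.pyGet?, PySem.List.pyIdx?, PySem.Dict.get?_insert_self]
    · have hne : ("transition_comment" : String) ≠ "transition_status" := by simp
      simp [PySem.List.pyGet?, PySem.List.pyIdx?,
        PySem.Dict.get?_insert_of_ne _ _ hne, h.2]
  · by_cases h2 : PySem.Str.startswith (PySem.Str.strip line) "transition_comment:" = true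
    · -- comment line
      have hpre : ("transition_comment".toList ++ [':']).isPrefixOf t = true := by
        have := h2
        simp only [PySem.Str.startswith_eq, PySem.Chars.startswith] at this
        rwa [hsplit2] at this
      rcases pv_prefix_split t _ hkey2 hpre with ⟨hmem, htw, _⟩
      have hs : PySem.Str.splitMax? (PySem.Str.strip line) ":" 1 =
          some ["transition_comment",
            String.ofList ((t.dropWhile (fun c => c ≠ ':')).tail)] := by
        simp only [PySem.Str.splitMax?, PySem.Chars.splitMax?]
        rw [show (":".toList : List Char) = [':'] from rfl]
        simp only [List.isEmpty_cons, ← ht, pv_split1 t, hmem, if_pos, htw]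
        simp
      have hin : PySem.Str.isIn ":" (PySem.Str.strip line) = true := by
        simp only [PySem.Str.isIn_eq]
        rw [show (":".toList : List Char) = [':'] from rfl, ← ht]
        exact (pv_isIn_colon t).mpr hmem
      rw [if_neg h1, if_pos h2, if_pos hin, hs]
      refine ⟨?_, ?_⟩
      · have hne : ("transition_status" : String) ≠ "transition_comment" := by simp
        simp [PySem.List.pyGet?, PySem.List.pyIdx?,
          PySem.Dict.get?_insert_of_ne _ _ hne, h.1]
      · simp [PySem.List.pyGet?, PySem.List.pyIdx?, PySem.Dict.get?_insert_self]
    · -- neither key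
      rw [if_neg h1, if_neg h2]
      by_cases hin : PySem.Str.isIn ":" (PySem.Str.strip line) = true
      · have hmem : ':' ∈ t := by
          have := hin
          simp only [PySem.Str.isIn_eq] at this
          rw [show (":".toList : List Char) = [':'] from rfl, ← ht] at this
          exact (pv_isIn_colon t).mp this
        have hs : PySem.Str.splitMax? (PySem.Str.strip line) ":" 1 =
            some [String.ofList (t.takeWhile (fun c => c ≠ ':')),
              String.ofList ((t.dropWhile (fun c => c ≠ ':')).tail)] := by
          simp only [PySem.Str.splitMax?, PySem.Chars.splitMax?]
          rw [show (":".toList : List Char) = [':'] from rfl]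
          simp [← ht, pv_split1 t, hmem]
        rw [if_pos hin, hs]
        have hne1 : ("transition_status" : String) ≠
            String.ofList (t.takeWhile (fun c => c ≠ ':')) := by
          intro hEq
          have htw : t.takeWhile (fun c => c ≠ ':') = "transition_status".toList := by
            have := congrArg String.toList hEq
            simpa [String.toList_ofList] using this.symm
          have hps : ("transition_status".toList ++ [':']).isPrefixOf t = false := by
            have h1' := h1
            simp only [PySem.Str.startswith_eq, PySem.Chars.startswith] at h1'
            rw [hsplit1] at h1'
            cases hb : ("transition_status".toList ++ [':']).isPrefixOf t
            · rfl
            · exact absurd hb h1'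
          exact pv_not_prefix t _ hmem hps htw
        have hne2 : ("transition_comment" : String) ≠
            String.ofList (t.takeWhile (fun c => c ≠ ':')) := by
          intro hEq
          have htw : t.takeWhile (fun c => c ≠ ':') = "transition_comment".toList := by
            have := congrArg String.toList hEq
            simpa [String.toList_ofList] using this.symm
          have hps : ("transition_comment".toList ++ [':']).isPrefixOf t = false := by
            have h2' := h2
            simp only [PySem.Str.startswith_eq, PySem.Chars.startswith] at h2'
            rw [hsplit2] at h2'
            cases hb : ("transition_comment".toList ++ [':']).isPrefixOf t
            · rfl
            · exact absurd hb h2'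
          exact pv_not_prefix t _ hmem hps htw
        exact ⟨by rw [PySem.Dict.get?_insert_of_ne _ _ hne1]; exact h.1,
          by rw [PySem.Dict.get?_insert_of_ne _ _ hne2]; exact h.2⟩
      · rw [if_neg hin]; exact h

-- the invariant survives the whole loop
theorem pv_foldl (lines : List String) (st : Option String × Option String)
    (d : PySem.Dict String String) (h : pvInv st d) :
    pvInv (lines.foldl pvStepA st) (lines.foldl pvStepB d) := by
  induction lines generalizing st d with
  | nil => exact h
  | cons line rest ih =>
    rw [List.foldl_cons, List.foldl_cons]
    exact ih _ _ (pv_step st d line h)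

-- ===== VERDICT (by name: the statement is the Claim_ definition above) =====
theorem extract_transition_fields_spec : Claim_equal_extract_transition_fields := by
  unfold Claim_equal_extract_transition_fields
  intro fm _
  unfold Spec_extract_transition_fields extract_transition_fields extract_transition_fields_alt
  by_cases hfm : fm == ""
  · rw [if_pos hfm, if_pos hfm]
  · rw [if_neg hfm, if_neg hfm]
    have h := pv_foldl (PySem.Str.splitlines fm) (none, none) PySem.Dict.empty
      ⟨by simp [PySem.Dict.get?_empty], by simp [PySem.Dict.get?_empty]⟩
    exact Prod.ext h.1.symm h.2.symm
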